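-- pv_equiv track=rewrite | github.com/tonio-m/chord-printer | chord-printer.py | paint_octave_drawing
-- ===== SOURCE A (Python) =====
-- OCTAVE_DRAWING = """
--   |1| |3|  |  |6| |8| |a|  |
--   |1| |3|  |  |6| |8| |a|  |
--   |1| |3|  |  |6| |8| |a|  |
--   |_| |_|  |  |_| |_| |_|  |
-- 000|222|444|555|777|999|bbb|
-- 000|222|444|555|777|999|bbb|
-- ___|___|___|___|___|___|___|
-- """
--
-- def paint_octave_drawing(chord):
--     drawing = OCTAVE_DRAWING
--     for i in range(0,12):
--         hex_placeholder = format(i,'x')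
--         if i in chord:
--             drawing = drawing.replace(hex_placeholder,'X')
--         else:
--             drawing = drawing.replace(hex_placeholder,' ')
--     return drawing
-- ===== SOURCE B (Python) =====
-- OCTAVE_DRAWING = """
--   |1| |3|  |  |6| |8| |a|  |
--   |1| |3|  |  |6| |8| |a|  |
--   |1| |3|  |  |6| |8| |a|  |
--   |_| |_|  |  |_| |_| |_|  |
-- 000|222|444|555|777|999|bbb|
-- 000|222|444|555|777|999|bbb|
-- ___|___|___|___|___|___|___|
-- """
--
-- def paint_octave_drawing(chord):
--     # Generative: build the diagram line by line from chord membership,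
--     # instead of substituting into a template.
--     def m(i):
--         return 'X' if i in chord else ' '
--     black = ('  |' + '| |'.join(m(i) for i in (1, 3)) + '|  |  |'
--              + '| |'.join(m(i) for i in (6, 8, 10)) + '|  |')
--     white = '|'.join(m(i) * 3 for i in (0, 2, 4, 5, 7, 9, 11)) + '|'
--     lines = [black] * 3 + ['  |_| |_|  |  |_| |_| |_|  |'] \
--             + [white] * 2 + ['___|___|___|___|___|___|___|']
--     return '\n' + '\n'.join(lines) + '\n'
-- ===== Notes on version B (the rewrite author's own statement) =====
-- stated objective: alternative
-- what changed: B generates the seven diagram lines directly from chord membership (building each black-key and white-key line by joining per-key segments) instead of A's twelve sequential full-template replace passes; the template string is never scanned.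
import Mathlib
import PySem

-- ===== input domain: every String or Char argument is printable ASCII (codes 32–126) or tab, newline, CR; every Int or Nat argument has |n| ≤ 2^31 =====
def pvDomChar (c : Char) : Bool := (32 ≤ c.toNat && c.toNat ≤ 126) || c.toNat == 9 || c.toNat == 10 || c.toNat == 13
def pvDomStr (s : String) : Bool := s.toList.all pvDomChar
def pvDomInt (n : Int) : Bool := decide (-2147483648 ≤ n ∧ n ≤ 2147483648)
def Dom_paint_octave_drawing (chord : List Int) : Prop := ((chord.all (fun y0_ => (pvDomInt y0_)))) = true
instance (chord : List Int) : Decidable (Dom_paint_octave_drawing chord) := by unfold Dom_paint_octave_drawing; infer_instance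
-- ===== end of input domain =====

set_option maxRecDepth 8000


-- B generates the seven diagram lines directly from chord membership (key segments joined
-- per line) instead of A's twelve sequential replace passes over a template string.

-- ===== PORT A =====
def pvOctaveDrawing : String :=
  "\n  |1| |3|  |  |6| |8| |a|  |\n  |1| |3|  |  |6| |8| |a|  |\n  |1| |3|  |  |6| |8| |a|  |\n  |_| |_|  |  |_| |_| |_|  |\n000|222|444|555|777|999|bbb|\n000|222|444|555|777|999|bbb|\n___|___|___|___|___|___|___|\n"

-- format(i,'x') for the single hex digits 0..11 used here (exact on 0 ≤ i < 16)
def pvHexChar (i : Int) : Char :=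
  if i < 10 then Char.ofNat (48 + i.toNat) else Char.ofNat (87 + i.toNat)

def paint_octave_drawing (chord : List Int) : String :=
  (PySem.List.pyRange 0 12 1).foldl
    (fun drawing i =>
      let hex_placeholder := String.ofList [pvHexChar i]
      if i ∈ chord then PySem.Str.replace drawing hex_placeholder "X"
      else PySem.Str.replace drawing hex_placeholder " ")
    pvOctaveDrawing

-- ===== PORT B =====
-- B is built over List Char ('+'/join = list append/intercalate), exact for these ASCII literals.
def paint_octave_drawing_alt (chord : List Int) : String :=
  let m : Int → Char := fun i => if i ∈ chord then 'X' else ' '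
  let black : List Char :=
    "  |".toList ++ List.intercalate "| |".toList ([1, 3].map (fun i => [m i]))
      ++ "|  |  |".toList ++ List.intercalate "| |".toList ([6, 8, 10].map (fun i => [m i]))
      ++ "|  |".toList
  let white : List Char :=
    List.intercalate "|".toList ([0, 2, 4, 5, 7, 9, 11].map (fun i => [m i, m i, m i]))
      ++ "|".toList
  let lines : List (List Char) :=
    List.replicate 3 black ++ ["  |_| |_|  |  |_| |_| |_|  |".toList]
      ++ List.replicate 2 white ++ ["___|___|___|___|___|___|___|".toList]
  String.ofList ('\n' :: List.intercalate "\n".toList lines ++ "\n".toList)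

-- ===== PRECONDITION & SPEC =====
def Spec_paint_octave_drawing (chord : List Int) (out : String) : Prop := out = paint_octave_drawing_alt chord
instance (chord : List Int) (out : String) : Decidable (Spec_paint_octave_drawing chord out) := by unfold Spec_paint_octave_drawing; infer_instance

-- ===== CLAIM (what is proved, stated in full; the proofs are below) =====
def Claim_equal_paint_octave_drawing : Prop := ∀ (chord : List Int), Dom_paint_octave_drawing chord → Spec_paint_octave_drawing chord (paint_octave_drawing chord)

-- ===== LEMMAS AND PROOFS =====

-- per-character substitution performed by step i of A's loop
def pvSub (chord : List Int) (i : Int) (c : Char) : Char :=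
  if c = pvHexChar i then (if i ∈ chord then 'X' else ' ') else c

-- the combined substitution after all 12 steps
def pvG (chord : List Int) (c : Char) : Char :=
  ([0,1,2,3,4,5,6,7,8,9,10,11] : List Int).foldl (fun c i => pvSub chord i c) c

lemma pv_go_single (o n : Char) : ∀ (fuel : Nat) (l acc : List Char), l.length ≤ fuel →
    PySem.Chars.replace.go [o] [n] fuel l acc
      = acc.reverse ++ l.map (fun c => if c = o then n else c) := by
  intro fuel
  induction fuel with
  | zero =>
    intro l acc h
    have : l = [] := List.eq_nil_of_length_eq_zero (Nat.le_zero.mp h)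
    subst this
    simp [PySem.Chars.replace.go]
  | succ f ih =>
    intro l acc h
    cases l with
    | nil => simp [PySem.Chars.replace.go]
    | cons c t =>
      have hf : t.length ≤ f := by simp at h; omega
      by_cases hc : o = c
      · subst hc
        simp only [PySem.Chars.replace.go, List.isPrefixOf, BEq.rfl, Bool.true_and]
        show PySem.Chars.replace.go [o] [n] f t ([n] ++ acc)
          = acc.reverse ++ List.map (fun c => if c = o then n else c) (o :: t)
        rw [ih t ([n] ++ acc) hf]
        simp
      · have hbeq : (o == c) = false := beq_eq_false_iff_ne.mpr hc
        have hcne : ¬ (c = o) := fun h' => hc h'.symm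
        simp only [PySem.Chars.replace.go, List.isPrefixOf, hbeq, Bool.false_and,
          Bool.false_eq_true, if_neg, not_false_iff]
        rw [ih t (c :: acc) hf]
        simp [hcne]

lemma pv_replace_single (s : List Char) (o n : Char) :
    PySem.Chars.replace s [o] [n] = s.map (fun c => if c = o then n else c) := by
  unfold PySem.Chars.replace
  simp [pv_go_single o n s.length s [] (le_refl _)]

lemma pvRange12 : PySem.List.pyRange 0 12 1 = [0,1,2,3,4,5,6,7,8,9,10,11] := by decide

lemma pv_stepA_toList (chord : List Int) (i : Int) (d : String) :
    ((fun drawing i =>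
      let hex_placeholder := String.ofList [pvHexChar i]
      if i ∈ chord then PySem.Str.replace drawing hex_placeholder "X"
      else PySem.Str.replace drawing hex_placeholder " ") d i).toList
      = d.toList.map (pvSub chord i) := by
  by_cases h : i ∈ chord <;>
    simp [h, pvSub, PySem.Str.toList_replace, pv_replace_single]

lemma pv_foldA_toList (chord : List Int) (is : List Int) (d : String) :
    (is.foldl
      (fun drawing i =>
        let hex_placeholder := String.ofList [pvHexChar i]
        if i ∈ chord then PySem.Str.replace drawing hex_placeholder "X"
        else PySem.Str.replace drawing hex_placeholder " ") d).toList
      = d.toList.map (fun c => is.foldl (fun c i => pvSub chord i c) c) := by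
  induction is generalizing d with
  | nil => simp
  | cons i is ih =>
    simp only [List.foldl_cons]
    rw [ih]
    rw [pv_stepA_toList chord i d]
    simp [List.map_map, Function.comp]

lemma pv_e0 : pvHexChar 0 = '0' := by decide
lemma pv_e1 : pvHexChar 1 = '1' := by decide
lemma pv_e2 : pvHexChar 2 = '2' := by decide
lemma pv_e3 : pvHexChar 3 = '3' := by decide
lemma pv_e4 : pvHexChar 4 = '4' := by decide
lemma pv_e5 : pvHexChar 5 = '5' := by decide
lemma pv_e6 : pvHexChar 6 = '6' := by decide
lemma pv_e7 : pvHexChar 7 = '7' := by decide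
lemma pv_e8 : pvHexChar 8 = '8' := by decide
lemma pv_e9 : pvHexChar 9 = '9' := by decide
lemma pv_e10 : pvHexChar 10 = 'a' := by decide
lemma pv_e11 : pvHexChar 11 = 'b' := by decide

-- pvG on the characters that occur in the template
lemma pvG_nl (chord : List Int) : pvG chord '\n' = '\n' := by
  simp [pvG, List.foldl, pvSub, pv_e0, pv_e1, pv_e2, pv_e3, pv_e4, pv_e5, pv_e6, pv_e7, pv_e8, pv_e9, pv_e10, pv_e11]
lemma pvG_sp (chord : List Int) : pvG chord ' ' = ' ' := by
  simp [pvG, List.foldl, pvSub, pv_e0, pv_e1, pv_e2, pv_e3, pv_e4, pv_e5, pv_e6, pv_e7, pv_e8, pv_e9, pv_e10, pv_e11]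
lemma pvG_bar (chord : List Int) : pvG chord '|' = '|' := by
  simp [pvG, List.foldl, pvSub, pv_e0, pv_e1, pv_e2, pv_e3, pv_e4, pv_e5, pv_e6, pv_e7, pv_e8, pv_e9, pv_e10, pv_e11]
lemma pvG_us (chord : List Int) : pvG chord '_' = '_' := by
  simp [pvG, List.foldl, pvSub, pv_e0, pv_e1, pv_e2, pv_e3, pv_e4, pv_e5, pv_e6, pv_e7, pv_e8, pv_e9, pv_e10, pv_e11]
lemma pvG_0 (chord : List Int) : pvG chord '0' = (if (0:Int) ∈ chord then 'X' else ' ') := by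
  by_cases m : (0:Int) ∈ chord <;>
    simp [pvG, List.foldl, pvSub, pv_e0, pv_e1, pv_e2, pv_e3, pv_e4, pv_e5, pv_e6, pv_e7, pv_e8, pv_e9, pv_e10, pv_e11, m]
lemma pvG_1 (chord : List Int) : pvG chord '1' = (if (1:Int) ∈ chord then 'X' else ' ') := by
  by_cases m : (1:Int) ∈ chord <;>
    simp [pvG, List.foldl, pvSub, pv_e0, pv_e1, pv_e2, pv_e3, pv_e4, pv_e5, pv_e6, pv_e7, pv_e8, pv_e9, pv_e10, pv_e11, m]
lemma pvG_2 (chord : List Int) : pvG chord '2' = (if (2:Int) ∈ chord then 'X' else ' ') := by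
  by_cases m : (2:Int) ∈ chord <;>
    simp [pvG, List.foldl, pvSub, pv_e0, pv_e1, pv_e2, pv_e3, pv_e4, pv_e5, pv_e6, pv_e7, pv_e8, pv_e9, pv_e10, pv_e11, m]
lemma pvG_3 (chord : List Int) : pvG chord '3' = (if (3:Int) ∈ chord then 'X' else ' ') := by
  by_cases m : (3:Int) ∈ chord <;>
    simp [pvG, List.foldl, pvSub, pv_e0, pv_e1, pv_e2, pv_e3, pv_e4, pv_e5, pv_e6, pv_e7, pv_e8, pv_e9, pv_e10, pv_e11, m]
lemma pvG_4 (chord : List Int) : pvG chord '4' = (if (4:Int) ∈ chord then 'X' else ' ') := by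
  by_cases m : (4:Int) ∈ chord <;>
    simp [pvG, List.foldl, pvSub, pv_e0, pv_e1, pv_e2, pv_e3, pv_e4, pv_e5, pv_e6, pv_e7, pv_e8, pv_e9, pv_e10, pv_e11, m]
lemma pvG_5 (chord : List Int) : pvG chord '5' = (if (5:Int) ∈ chord then 'X' else ' ') := by
  by_cases m : (5:Int) ∈ chord <;>
    simp [pvG, List.foldl, pvSub, pv_e0, pv_e1, pv_e2, pv_e3, pv_e4, pv_e5, pv_e6, pv_e7, pv_e8, pv_e9, pv_e10, pv_e11, m]
lemma pvG_6 (chord : List Int) : pvG chord '6' = (if (6:Int) ∈ chord then 'X' else ' ') := by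
  by_cases m : (6:Int) ∈ chord <;>
    simp [pvG, List.foldl, pvSub, pv_e0, pv_e1, pv_e2, pv_e3, pv_e4, pv_e5, pv_e6, pv_e7, pv_e8, pv_e9, pv_e10, pv_e11, m]
lemma pvG_7 (chord : List Int) : pvG chord '7' = (if (7:Int) ∈ chord then 'X' else ' ') := by
  by_cases m : (7:Int) ∈ chord <;>
    simp [pvG, List.foldl, pvSub, pv_e0, pv_e1, pv_e2, pv_e3, pv_e4, pv_e5, pv_e6, pv_e7, pv_e8, pv_e9, pv_e10, pv_e11, m]
lemma pvG_8 (chord : List Int) : pvG chord '8' = (if (8:Int) ∈ chord then 'X' else ' ') := by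
  by_cases m : (8:Int) ∈ chord <;>
    simp [pvG, List.foldl, pvSub, pv_e0, pv_e1, pv_e2, pv_e3, pv_e4, pv_e5, pv_e6, pv_e7, pv_e8, pv_e9, pv_e10, pv_e11, m]
lemma pvG_9 (chord : List Int) : pvG chord '9' = (if (9:Int) ∈ chord then 'X' else ' ') := by
  by_cases m : (9:Int) ∈ chord <;>
    simp [pvG, List.foldl, pvSub, pv_e0, pv_e1, pv_e2, pv_e3, pv_e4, pv_e5, pv_e6, pv_e7, pv_e8, pv_e9, pv_e10, pv_e11, m]
lemma pvG_a (chord : List Int) : pvG chord 'a' = (if (10:Int) ∈ chord then 'X' else ' ') := by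
  by_cases m : (10:Int) ∈ chord <;>
    simp [pvG, List.foldl, pvSub, pv_e0, pv_e1, pv_e2, pv_e3, pv_e4, pv_e5, pv_e6, pv_e7, pv_e8, pv_e9, pv_e10, pv_e11, m]
lemma pvG_b (chord : List Int) : pvG chord 'b' = (if (11:Int) ∈ chord then 'X' else ' ') := by
  by_cases m : (11:Int) ∈ chord <;>
    simp [pvG, List.foldl, pvSub, pv_e0, pv_e1, pv_e2, pv_e3, pv_e4, pv_e5, pv_e6, pv_e7, pv_e8, pv_e9, pv_e10, pv_e11, m]

lemma pv_template_chars : pvOctaveDrawing.toList =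
  ['\n', ' ', ' ', '|', '1', '|', ' ', '|', '3', '|', ' ', ' ', '|', ' ', ' ', '|', '6', '|', ' ', '|', '8', '|', ' ', '|', 'a', '|', ' ', ' ', '|', '\n', ' ', ' ', '|', '1', '|', ' ', '|', '3', '|', ' ', ' ', '|', ' ', ' ', '|', '6', '|', ' ', '|', '8', '|', ' ', '|', 'a', '|', ' ', ' ', '|', '\n', ' ', ' ', '|', '1', '|', ' ', '|', '3', '|', ' ', ' ', '|', ' ', ' ', '|', '6', '|', ' ', '|', '8', '|', ' ', '|', 'a', '|', ' ', ' ', '|', '\n', ' ', ' ', '|', '_', '|', ' ', '|', '_', '|', ' ', ' ', '|', ' ', ' ', '|', '_', '|', ' ', '|', '_', '|', ' ', '|', '_', '|', ' ', ' ', '|', '\n', '0', '0', '0', '|', '2', '2', '2', '|', '4', '4', '4', '|', '5', '5', '5', '|', '7', '7', '7', '|', '9', '9', '9', '|', 'b', 'b', 'b', '|', '\n', '0', '0', '0', '|', '2', '2', '2', '|', '4', '4', '4', '|', '5', '5', '5', '|', '7', '7', '7', '|', '9', '9', '9', '|', 'b', 'b', 'b', '|', '\n', '_', '_', '_', '|',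 '_', '_', '_', '|', '_', '_', '_', '|', '_', '_', '_', '|', '_', '_', '_', '|', '_', '_', '_', '|', '_', '_', '_', '|', '\n'] := by
  decide

-- ===== VERDICT (by name: the statement is the Claim_ definition above) =====
theorem paint_octave_drawing_spec : Claim_equal_paint_octave_drawing := by
  intro chord _
  unfold Spec_paint_octave_drawing
  apply String.ext
  show (paint_octave_drawing chord).toList = (paint_octave_drawing_alt chord).toList
  rw [show (paint_octave_drawing chord).toList
        = pvOctaveDrawing.toList.map (pvG chord) from by
      unfold paint_octave_drawing
      rw [pv_foldA_toList chord _ pvOctaveDrawing, pvRange12]; rfl]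
  rw [pv_template_chars]
  simp only [List.map_cons, List.map_nil,
    pvG_nl, pvG_sp, pvG_bar, pvG_us, pvG_0, pvG_1, pvG_2, pvG_3, pvG_4, pvG_5, pvG_6,
    pvG_7, pvG_8, pvG_9, pvG_a, pvG_b]
  simp [paint_octave_drawing_alt, List.intercalate, List.replicate]
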